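-- pv_equiv track=rewrite | github.com/aguscoppe/ejercicios-python | TP_6_Listas/TP6_EJ19.py | mayorSecuencia
-- ===== SOURCE A (Python) =====
-- def mayorSecuencia(secuencia):
--     cont = 0
--     secuenciaMaxima = 0
--     for i in range (len(secuencia)):
--         if secuencia[i] != 0:
--             cont += 1
--         else:
--             if cont > secuenciaMaxima:
--                 secuenciaMaxima = cont
--             cont = 0
--     return secuenciaMaxima
-- ===== SOURCE B (Python) =====
-- def mayorSecuencia(secuencia):
--     # Measure each maximal nonzero run as the gap between consecutive zero
--     # boundaries (with a virtual boundary at index -1).  The run after the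
--     # last zero has no right boundary and so is not counted, exactly as in A.
--     zeros = [i for i, x in enumerate(secuencia) if x == 0]
--     best = 0
--     prev = -1
--     for z in zeros:
--         gap = z - prev - 1
--         if gap > best:
--             best = gap
--         prev = z
--     return best
-- ===== Notes on version B (the rewrite author's own statement) =====
-- stated objective: alternative
-- what changed: B computes run lengths as gaps between consecutive zero indices (collected first, then scanned with a prev boundary) instead of A's running counter reset at each zero.
import Mathlib
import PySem

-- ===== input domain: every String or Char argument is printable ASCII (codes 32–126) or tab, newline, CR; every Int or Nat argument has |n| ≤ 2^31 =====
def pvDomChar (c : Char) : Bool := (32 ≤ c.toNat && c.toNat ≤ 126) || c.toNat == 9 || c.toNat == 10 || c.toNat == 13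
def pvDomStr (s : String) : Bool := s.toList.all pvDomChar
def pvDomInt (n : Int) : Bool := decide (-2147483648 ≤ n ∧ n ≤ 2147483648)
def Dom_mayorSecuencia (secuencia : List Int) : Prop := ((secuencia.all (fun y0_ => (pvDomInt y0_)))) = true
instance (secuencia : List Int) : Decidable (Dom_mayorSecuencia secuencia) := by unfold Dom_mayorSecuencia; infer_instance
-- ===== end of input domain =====

-- B measures each nonzero run as the gap between consecutive zero boundaries
-- (zero indices collected first), instead of A's running counter; same cost,
-- genuinely different decomposition.


-- ===== PORT A =====
def mayorSecuencia (secuencia : List Int) : Int :=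
  let r := (PySem.List.pyRange 0 (secuencia.length : Int) 1).foldl
    (fun (st : Int × Int) i =>
      if PySem.List.pyGetD secuencia i 0 ≠ 0 then
        (st.1 + 1, st.2)
      else
        (0, if st.1 > st.2 then st.1 else st.2))
    (0, 0)
  r.2

-- ===== PORT B =====
def mayorSecuencia_alt (secuencia : List Int) : Int :=
  let zeros := ((PySem.List.enumerate secuencia 0).filter (fun p => p.2 == 0)).map (fun p => p.1)
  let r := zeros.foldl
    (fun (st : Int × Int) z =>
      let gap := z - st.1 - 1
      (z, if gap > st.2 then gap else st.2))
    (-1, 0)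
  r.2

-- ===== PRECONDITION & SPEC =====
def Spec_mayorSecuencia (secuencia : List Int) (out : Int) : Prop := out = mayorSecuencia_alt secuencia
instance (secuencia : List Int) (out : Int) : Decidable (Spec_mayorSecuencia secuencia out) := by unfold Spec_mayorSecuencia; infer_instance

-- ===== CLAIM (what is proved, stated in full; the proofs are below) =====
def Claim_equal_mayorSecuencia : Prop := ∀ (secuencia : List Int), Dom_mayorSecuencia secuencia → Spec_mayorSecuencia secuencia (mayorSecuencia secuencia)

-- ===== LEMMAS AND PROOFS =====

-- A's step on an element, B's step on a zero index.
def pvStepA (st : Int × Int) (x : Int) : Int × Int :=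
  if x ≠ 0 then (st.1 + 1, st.2)
  else (0, if st.1 > st.2 then st.1 else st.2)

def pvStepB (st : Int × Int) (z : Int) : Int × Int :=
  (z, if z - st.1 - 1 > st.2 then z - st.1 - 1 else st.2)

-- Invariant: A's counter equals (current index) - (last zero boundary) - 1.
lemma pv_main (xs : List Int) : ∀ (s prev best : Int),
    (xs.foldl pvStepA (s - prev - 1, best)).2 =
    ((((PySem.List.enumerate xs s).filter (fun p => p.2 == 0)).map (fun p => p.1)).foldl
        pvStepB (prev, best)).2 := by
  induction xs with
  | nil => intro s prev best; simp [PySem.List.enumerate_nil]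
  | cons x xs ih =>
    intro s prev best
    simp only [PySem.List.enumerate_cons, List.filter_cons, List.foldl_cons]
    by_cases hx : x = 0
    · subst hx
      simp only [pvStepA]
      simp only [ne_eq, not_true_eq_false, if_false, beq_self_eq_true, if_true,
        List.map_cons, List.foldl_cons]
      have := ih (s + 1) s (if s - prev - 1 > best then s - prev - 1 else best)
      have h0 : s + 1 - s - 1 = (0 : Int) := by ring
      rw [h0] at this
      simpa [pvStepB] using this
    · have hb : (x == 0) = false := by simpa using hx
      simp only [pvStepA, hb, ne_eq, hx, not_false_eq_true, if_true]
      have := ih (s + 1) prev best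
      have h1 : s + 1 - prev - 1 = s - prev - 1 + 1 := by ring
      rw [h1] at this
      simpa using this

lemma pv_portA_foldl (secuencia : List Int) :
    mayorSecuencia secuencia = (secuencia.foldl pvStepA (0, 0)).2 := by
  unfold mayorSecuencia
  rw [PySem.List.foldl_pyRange_zero_pyGetD' secuencia 0
    (fun st x => if x ≠ 0 then (st.1 + 1, st.2) else (0, if st.1 > st.2 then st.1 else st.2)) (0, 0)]
  rfl

-- ===== VERDICT (by name: the statement is the Claim_ definition above) =====
theorem mayorSecuencia_spec : Claim_equal_mayorSecuencia := by
  intro secuencia _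
  unfold Spec_mayorSecuencia mayorSecuencia_alt
  rw [pv_portA_foldl]
  have := pv_main secuencia 0 (-1) 0
  norm_num at this
  simpa [pvStepB] using this
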